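-- pv_equiv track=rewrite | github.com/SeleniaProject/NyxNet | scripts/verify.py | _extract_counterexample
-- ===== SOURCE A (Python) =====
-- from typing import Dict, List, Optional, Tuple, Any
--
-- def _extract_counterexample(output: str) -> Optional[str]:
--     """Extract counterexample from TLC output"""
--     lines = output.split('\n')
--     counterexample_lines = []
--     in_counterexample = False
--
--     for line in lines:
--         if "Error: Invariant" in line or "Error: Temporal property" in line:
--             in_counterexample = True
--             counterexample_lines.append(line)
--         elif in_counterexample:
--             if line.strip() == "" and len(counterexample_lines) > 10:
--                 break
--             counterexample_lines.append(line)
--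
--     return '\n'.join(counterexample_lines) if counterexample_lines else None
-- ===== SOURCE B (Python) =====
-- def _extract_counterexample(output):
--     """Extract counterexample from TLC output.
--
--     Index-arithmetic version: no accumulation loop and no state flag.
--     start = index of the first error-marker line (the break happens at the
--     first blank line only once more than 10 lines are collected, i.e. at a
--     blank line with index >= start + 11, and marker lines are never blank),
--     end = first blank-line index in range(start + 11, len(lines)); the
--     answer is simply the slice lines[start:end].
--     """
--     lines = output.split('\n')
--     start = next((i for i, l in enumerate(lines)
--                   if "Error: Invariant" in l or "Error: Temporal property" in l), None)
--     if start is None: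
--         return None
--     end = next((j for j in range(start + 11, len(lines)) if lines[j].strip() == ""),
--                len(lines))
--     return '\n'.join(lines[start:end])
-- ===== Notes on version B (the rewrite author's own statement) =====
-- stated objective: alternative
-- what changed: Replaces A's stateful flag-driven pass that appends lines one by one with pure index arithmetic: compute start (first marker line) and end (first blank line at index >= start+11, exploiting that marker lines are never blank so the >10-collected break point is exactly that index) and return the slice lines[start:end]; no accumulator or flag exists.
import Mathlib
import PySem

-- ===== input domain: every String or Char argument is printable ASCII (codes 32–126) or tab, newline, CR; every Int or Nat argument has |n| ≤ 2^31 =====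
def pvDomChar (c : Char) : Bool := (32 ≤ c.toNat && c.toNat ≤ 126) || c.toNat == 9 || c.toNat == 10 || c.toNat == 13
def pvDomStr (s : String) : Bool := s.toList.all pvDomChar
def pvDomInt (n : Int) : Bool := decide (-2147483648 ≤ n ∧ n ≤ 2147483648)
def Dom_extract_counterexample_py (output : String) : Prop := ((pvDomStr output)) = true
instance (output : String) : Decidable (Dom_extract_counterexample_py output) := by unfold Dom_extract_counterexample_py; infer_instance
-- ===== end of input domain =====

-- B replaces A's flag-driven accumulating pass by index arithmetic: first marker index,
-- first blank index ≥ start+11, and a slice between them; objective: alternative.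

-- the shared error-marker test ("Error: Invariant" in line or "Error: Temporal property" in line)
def pvMarker (l : List Char) : Bool :=
  PySem.Chars.isIn "Error: Invariant".toList l ||
    PySem.Chars.isIn "Error: Temporal property".toList l

-- ===== PORT A =====
-- the for-loop of A over the remaining lines, state = (counterexample_lines, in_counterexample)
def pvLoopA : List (List Char) → List (List Char) → Bool → List (List Char)
  | [], acc, _ => acc
  | l :: ls, acc, flag =>
    if pvMarker l then pvLoopA ls (acc ++ [l]) true
    else if flag then
      if PySem.Chars.strip l = [] ∧ acc.length > 10 then acc
      else pvLoopA ls (acc ++ [l]) flag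
    else pvLoopA ls acc flag

def extract_counterexample_py (output : String) : Option String :=
  let lines := PySem.Chars.splitOn output.toList "\n".toList
  let acc := pvLoopA lines [] false
  if acc ≠ [] then some (String.ofList (PySem.Chars.join "\n".toList acc)) else none

-- ===== PORT B =====
-- start: next((i for i, l in enumerate(lines) if marker), None)
def pvFindIdx : List (List Char) → Nat → Option Nat
  | [], _ => none
  | l :: ls, i => if pvMarker l then some i else pvFindIdx ls (i + 1)

-- pvFirstBlank t = index of the first blank (stripped-empty) line of t, or t.length if none
def pvFirstBlank : List (List Char) → Nat
  | [] => 0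
  | l :: ls => if PySem.Chars.strip l = [] then 0 else 1 + pvFirstBlank ls

def extract_counterexample_py_alt (output : String) : Option String :=
  let lines := PySem.Chars.splitOn output.toList "\n".toList
  match pvFindIdx lines 0 with
  | none => none
  | some start =>
    -- end = next((j for j in range(start+11, len(lines)) if blank lines[j]), len(lines))
    let e := min lines.length (start + 11 + pvFirstBlank (lines.drop (start + 11)))
    -- lines[start:end] with 0 ≤ start ≤ end is drop start, take (end - start)
    some (String.ofList (PySem.Chars.join "\n".toList ((lines.drop start).take (e - start))))

-- ===== PRECONDITION & SPEC =====
def Spec_extract_counterexample_py (output : String) (out : Option String) : Prop := out = extract_counterexample_py_alt output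
instance (output : String) (out : Option String) : Decidable (Spec_extract_counterexample_py output out) := by unfold Spec_extract_counterexample_py; infer_instance

-- ===== CLAIM (what is proved, stated in full; the proofs are below) =====
def Claim_equal_extract_counterexample_py : Prop := ∀ (output : String), Dom_extract_counterexample_py output → Spec_extract_counterexample_py output (extract_counterexample_py output)

-- ===== LEMMAS AND PROOFS =====

-- a line containing a marker is not blank after strip
theorem pv_mem_strip {c : Char} {s : List Char} (hc : c ∈ s) (hs : PySem.Chars.isspace c = false) :
    c ∈ PySem.Chars.strip s := by
  unfold PySem.Chars.strip PySem.Chars.lstrip PySem.Chars.rstrip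
  have step : ∀ (t : List Char), c ∈ t → c ∈ List.dropWhile PySem.Chars.isspace t := by
    intro t ht
    have := List.takeWhile_append_dropWhile (p := PySem.Chars.isspace) (l := t)
    rw [← this] at ht
    rcases List.mem_append.mp ht with h | h
    · exact absurd (List.mem_takeWhile_imp h) (by simp [hs])
    · exact h
  have h1 : c ∈ List.dropWhile PySem.Chars.isspace s := step s hc
  have h2 : c ∈ List.dropWhile PySem.Chars.isspace (List.dropWhile PySem.Chars.isspace s).reverse :=
    step _ (List.mem_reverse.mpr h1)
  exact List.mem_reverse.mpr h2

theorem pv_marker_not_blank {l : List Char} (h : pvMarker l = true) :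
    ¬ (PySem.Chars.strip l = []) := by
  unfold pvMarker at h
  have hE : 'E' ∈ l := by
    rcases Bool.or_eq_true_iff.mp h with h' | h' <;>
    · have := (PySem.Chars.isIn_iff_infix _ _).mp h'
      exact this.subset (by decide)
  intro hnil
  have : 'E' ∈ PySem.Chars.strip l := pv_mem_strip hE (by decide)
  simp [hnil] at this

-- A's collect phase (flag already true), used only in the proof to characterise A's loop
def pvCollect : List (List Char) → List (List Char) → List (List Char)
  | [], acc => acc
  | l :: ls, acc =>
    if PySem.Chars.strip l = [] ∧ acc.length > 10 then acc
    else pvCollect ls (acc ++ [l])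

-- the number of lines the collect phase takes, given the current accumulator length
def pvCut : List (List Char) → Nat → Nat
  | [], _ => 0
  | l :: ls, n =>
    if PySem.Chars.strip l = [] ∧ n > 10 then 0 else 1 + pvCut ls (n + 1)

-- with the flag set, A's remaining loop is exactly the collect phase
theorem pvLoopA_true_eq_collect : ∀ (ls acc : List (List Char)),
    pvLoopA ls acc true = pvCollect ls acc := by
  intro ls
  induction ls with
  | nil => intro acc; rfl
  | cons l ls ih =>
    intro acc
    by_cases hm : pvMarker l = true
    · have hnb := pv_marker_not_blank hm
      simp [pvLoopA, pvCollect, hm, hnb, ih]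
    · simp [pvLoopA, pvCollect, hm, ih]

-- the collect phase is a prefix of the remaining lines
theorem pvCollect_eq_take : ∀ (ls acc : List (List Char)),
    pvCollect ls acc = acc ++ ls.take (pvCut ls acc.length) := by
  intro ls
  induction ls with
  | nil => intro acc; simp [pvCollect, pvCut]
  | cons l ls ih =>
    intro acc
    by_cases hc : PySem.Chars.strip l = [] ∧ acc.length > 10
    · simp [pvCollect, pvCut, hc]
    · simp only [pvCollect, pvCut, if_neg hc]
      rw [ih, Nat.add_comm]
      simp
-- the cut point in closed form: min of the list length and the first blank index past slot 11-n
theorem pvCut_eq_min : ∀ (ls : List (List Char)) (n : Nat),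
    pvCut ls n = min ls.length ((11 - n) + pvFirstBlank (ls.drop (11 - n))) := by
  intro ls
  induction ls with
  | nil => intro n; simp [pvCut]
  | cons l ls ih =>
    intro n
    by_cases hn : n > 10
    · have hm : 11 - n = 0 := by omega
      by_cases hb : PySem.Chars.strip l = []
      · simp [pvCut, hb, hn, hm, pvFirstBlank]
      · have h1 : 11 - (n + 1) = 0 := by omega
        have hfb : pvFirstBlank (l :: ls) = 1 + pvFirstBlank ls := by
          simp [pvFirstBlank, hb]
        rw [show pvCut (l :: ls) n = 1 + pvCut ls (n + 1) by simp [pvCut, hb]]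
        rw [ih, h1, hm]
        simp only [List.drop_zero, List.length_cons, Nat.zero_add, hfb]
        omega
    · have hm : 11 - n = (11 - (n + 1)) + 1 := by omega
      rw [show pvCut (l :: ls) n = 1 + pvCut ls (n + 1) by simp [pvCut]; omega]
      rw [ih, hm]
      simp only [List.length_cons, List.drop_succ_cons]
      omega

-- the blank index is at most the length of its list
theorem pvFirstBlank_le : ∀ (ls : List (List Char)), pvFirstBlank ls ≤ ls.length := by
  intro ls
  induction ls with
  | nil => simp [pvFirstBlank]
  | cons l ls ih =>
    by_cases hb : PySem.Chars.strip l = []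
    · simp [pvFirstBlank, hb]
    · simp [pvFirstBlank, hb]; omega

-- index shift for the find phase
theorem pvFindIdx_shift : ∀ (ls : List (List Char)) (n : Nat),
    pvFindIdx ls (n + 1) = (pvFindIdx ls n).map (· + 1) := by
  intro ls
  induction ls with
  | nil => intro n; rfl
  | cons l ls ih =>
    intro n
    by_cases hm : pvMarker l = true <;> simp [pvFindIdx, hm, ih]

theorem pvFindIdx_lt : ∀ (ls : List (List Char)) (i : Nat),
    pvFindIdx ls 0 = some i → i < ls.length := by
  intro ls
  induction ls with
  | nil => intro i h; simp [pvFindIdx] at h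
  | cons l ls ih =>
    intro i h
    by_cases hm : pvMarker l = true
    · simp [pvFindIdx, hm] at h
      simp only [List.length_cons]; omega
    · rw [pvFindIdx, if_neg (by simp [hm]), pvFindIdx_shift] at h
      rcases Option.map_eq_some_iff.mp h with ⟨j, hj, rfl⟩
      have := ih j hj
      simp only [List.length_cons]; omega

-- A's whole loop = collect phase from the first marker index
theorem pvLoopA_eq_phases : ∀ (ls : List (List Char)),
    pvLoopA ls [] false =
      (match pvFindIdx ls 0 with
       | none => []
       | some i => pvCollect (ls.drop i) []) := by
  intro ls
  induction ls with
  | nil => rfl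
  | cons l ls ih =>
    by_cases hm : pvMarker l = true
    · have hnb := pv_marker_not_blank hm
      simp only [pvLoopA, pvFindIdx, hm, if_pos, List.drop_zero]
      rw [pvLoopA_true_eq_collect]
      show pvCollect ls [l] = pvCollect (l :: ls) []
      simp [pvCollect, hnb]
    · simp only [pvLoopA, pvFindIdx, hm, if_neg, Bool.false_eq_true, not_false_eq_true]
      rw [ih]
      have hs := pvFindIdx_shift ls 0
      cases h : pvFindIdx ls 0 with
      | none => rw [h] at hs; simp [hs]
      | some j => rw [h] at hs; simp [hs]

-- the collect phase from the marker index, in B's closed slice form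
theorem pv_closed (lines : List (List Char)) (start : Nat) :
    pvCollect (lines.drop start) [] =
      (lines.drop start).take
        (min lines.length (start + 11 + pvFirstBlank (lines.drop (start + 11))) - start) := by
  have hcut := pvCollect_eq_take (lines.drop start) []
  simp only [List.nil_append, List.length_nil] at hcut
  rw [hcut, pvCut_eq_min]
  simp only [Nat.sub_zero]
  congr 1
  have hdd : lines.drop (start + 11) = (lines.drop start).drop 11 := by
    simp [List.drop_drop]
  rw [hdd]
  have hfb := pvFirstBlank_le ((lines.drop start).drop 11)
  have h1 : ((lines.drop start).drop 11).length = lines.length - start - 11 := by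
    simp; omega
  have h2 : (lines.drop start).length = lines.length - start := by simp
  omega

-- the marker line itself is always collected
theorem pv_nonempty (lines : List (List Char)) (start : Nat) (hlt : start < lines.length) :
    pvCollect (lines.drop start) [] ≠ [] := by
  have hds_ne : lines.drop start ≠ [] := by
    intro hc
    have := List.drop_eq_nil_iff.mp hc
    omega
  rcases List.exists_cons_of_ne_nil hds_ne with ⟨a, rest, heq⟩
  rw [heq]
  have hpos : pvCut (a :: rest) 0 ≠ 0 := by
    simp only [pvCut]
    split
    · omega
    · omega
  have hcut := pvCollect_eq_take (a :: rest) []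
  simp only [List.nil_append, List.length_nil] at hcut
  rw [hcut]
  simp [List.take_eq_nil_iff, hpos]

-- ===== VERDICT (by name: the statement is the Claim_ definition above) =====
theorem extract_counterexample_py_spec : Claim_equal_extract_counterexample_py := by
  intro output _
  unfold Spec_extract_counterexample_py extract_counterexample_py extract_counterexample_py_alt
  simp only []
  rw [pvLoopA_eq_phases]
  cases h : pvFindIdx (PySem.Chars.splitOn output.toList "\n".toList) 0 with
  | none => simp
  | some start =>
    have hlt := pvFindIdx_lt _ _ h
    have hne := pv_nonempty (PySem.Chars.splitOn output.toList "\n".toList) start hlt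
    have hcl := pv_closed (PySem.Chars.splitOn output.toList "\n".toList) start
    simp
    exact ⟨hne, congrArg String.ofList (congrArg (PySem.Chars.join ['\n']) hcl)⟩
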